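-- pv_equiv track=rewrite | github.com/MouadMaaziz/Form_document_extraction | src/documentai_extract.py | locate_fields
-- ===== SOURCE A (Python) =====
-- def locate_fields(fields:dict, text_lines:list):
--     """Search the position field labels throughout the document"""
--     field_index = {}
--     for field, field_variations in fields.items():
--         field_indices = []
--         for index, text_line in enumerate(text_lines):
--             for variation in field_variations:
--                 if variation in text_line:
--                     field_indices.append(index)
--                     break
--         field_index[field]=field_indices
--     return field_index
-- ===== SOURCE B (Python) =====
-- def locate_fields(fields: dict, text_lines: list):
--     """Inverted-index re-implementation: build one postings list per DISTINCT
--     label variation in a first stage (so a variation shared by several fields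
--     is scanned for only once), then each field's hit list is the sorted set
--     union of its variations' postings lists."""
--     postings = {v: [i for i, line in enumerate(text_lines) if v in line]
--                 for _, vs in fields.items() for v in vs}
--     return {field: sorted({i for v in vs for i in postings[v]})
--             for field, vs in fields.items()}
-- ===== Notes on version B (the rewrite author's own statement) =====
-- stated objective: alternative
-- what changed: Replaces A's per-field nested scan with break by a two-stage inverted index: one postings list per distinct variation is computed once, and each field's result is the sorted set-union of its variations' postings, so duplicate variations across fields are scanned for only once.
import Mathlib
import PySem

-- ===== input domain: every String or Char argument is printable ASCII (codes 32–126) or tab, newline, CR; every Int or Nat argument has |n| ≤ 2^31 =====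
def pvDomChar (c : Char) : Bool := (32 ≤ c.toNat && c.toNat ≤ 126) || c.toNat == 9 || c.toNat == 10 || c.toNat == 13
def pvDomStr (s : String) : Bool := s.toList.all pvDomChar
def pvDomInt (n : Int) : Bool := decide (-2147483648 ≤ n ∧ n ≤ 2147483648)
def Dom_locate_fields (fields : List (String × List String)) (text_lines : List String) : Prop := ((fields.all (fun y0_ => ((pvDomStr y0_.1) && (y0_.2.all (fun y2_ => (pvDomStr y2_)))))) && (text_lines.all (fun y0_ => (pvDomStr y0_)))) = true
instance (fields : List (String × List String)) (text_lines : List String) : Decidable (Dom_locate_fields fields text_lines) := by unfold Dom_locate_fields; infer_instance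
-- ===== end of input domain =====

-- B replaces A's per-field nested scan by a two-stage inverted index (postings list per distinct variation, then sorted set-union per field); alternative algorithm, same results.


-- ===== PORT A =====
-- the inner 'for variation …: if variation in text_line: append; break' appends the line index
-- exactly when SOME variation is a substring, i.e. List.any over PySem.Str.isIn
def locate_fields (fields : List (String × List String)) (text_lines : List String) : List (String × List Int) :=
  (fields.foldl (fun field_index p =>
      field_index.insert p.1
        ((PySem.List.enumerate text_lines).foldl (fun field_indices q =>
            if p.2.any (fun variation => PySem.Str.isIn variation q.2)
            then field_indices ++ [q.1] else field_indices) []))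
    PySem.Dict.empty).items

-- ===== PORT B =====
-- '[i for i, line in enumerate(text_lines) if v in line]' — one variation's postings list
def pvPostings (text_lines : List String) (v : String) : List Int :=
  (PySem.List.enumerate text_lines).filterMap
    (fun q => if PySem.Str.isIn v q.2 then some q.1 else none)

-- dict comprehension over all (field, variation) pairs, then per field
-- sorted({i for v in vs for i in postings[v]}); 'postings[v]' never misses a key
-- (every v of every field was inserted by the first comprehension), so it is getD v []
def locate_fields_alt (fields : List (String × List String)) (text_lines : List String) : List (String × List Int) :=
  let postings : PySem.Dict String (List Int) :=
    (fields.flatMap (fun p => p.2)).foldl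
      (fun d v => d.insert v (pvPostings text_lines v)) PySem.Dict.empty
  (fields.foldl (fun out p =>
      out.insert p.1
        (PySem.List.sorted
          (PySem.Set.ofList (p.2.flatMap (fun v => postings.getD v [])))
          (fun x => x) false))
    PySem.Dict.empty).items

-- ===== PRECONDITION & SPEC =====
def Spec_locate_fields (fields : List (String × List String)) (text_lines : List String) (out : List (String × List Int)) : Prop := out = locate_fields_alt fields text_lines
instance (fields : List (String × List String)) (text_lines : List String) (out : List (String × List Int)) : Decidable (Spec_locate_fields fields text_lines out) := by unfold Spec_locate_fields; infer_instance

-- ===== CLAIM (what is proved, stated in full; the proofs are below) =====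
def Claim_equal_locate_fields : Prop := ∀ (fields : List (String × List String)) (text_lines : List String), Dom_locate_fields fields text_lines → Spec_locate_fields fields text_lines (locate_fields fields text_lines)

-- ===== LEMMAS AND PROOFS =====

-- the postings dict is a memo table of pvPostings: looking up any inserted key gives pvPostings of it
theorem pvGetD_build (tl : List String) (ks : List String) (d0 : PySem.Dict String (List Int))
    (k : String) :
    (ks.foldl (fun d v => d.insert v (pvPostings tl v)) d0).getD k []
      = if k ∈ ks then pvPostings tl k else d0.getD k [] := by
  induction ks generalizing d0 with
  | nil => simp
  | cons v vs ih =>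
    simp only [List.foldl_cons, ih, PySem.Dict.getD_insert, List.mem_cons]
    by_cases hk : k ∈ vs <;> by_cases hv : k = v <;> simp [hk, hv]

-- A's per-field loop result, in closed form
theorem pvAfield (tl : List String) (vs : List String) :
    (PySem.List.enumerate tl).foldl (fun acc q =>
        if vs.any (fun v => PySem.Str.isIn v q.2) then acc ++ [q.1] else acc) []
      = (((PySem.List.enumerate tl).filter
            (fun q => vs.any (fun v => PySem.Str.isIn v q.2))).map (fun q => q.1)) := by
  simpa using PySem.List.foldl_append_if
    (fun q : Int × String => vs.any (fun v => PySem.Str.isIn v q.2)) (fun q => q.1)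
    (PySem.List.enumerate tl) []

-- B's sorted set-union of the variations' postings is exactly A's per-field list
theorem pvField (tl : List String) (vs : List String) :
    PySem.List.sorted (PySem.Set.ofList (vs.flatMap (pvPostings tl))) (fun x => x) false
      = (PySem.List.enumerate tl).foldl (fun acc q =>
          if vs.any (fun v => PySem.Str.isIn v q.2) then acc ++ [q.1] else acc) [] := by
  rw [pvAfield]
  set L := (((PySem.List.enumerate tl).filter
      (fun q => vs.any (fun v => PySem.Str.isIn v q.2))).map (fun q => q.1)) with hL
  have hpw : L.Pairwise (· < ·) := by
    rw [hL, List.pairwise_map]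
    exact (PySem.List.pairwise_lt_enumerate tl 0).filter _
  refine PySem.List.sorted_eq_of_perm_of_pairwise_lt _ L (fun x => x) ?_ (by simpa using hpw)
  refine (List.perm_ext_iff_of_nodup (hpw.imp LT.lt.ne) (PySem.Set.nodup_ofList _)).mpr ?_
  intro x
  simp only [PySem.Set.mem_ofList, List.mem_flatMap, pvPostings, List.mem_filterMap,
    hL, List.mem_map, List.mem_filter]
  constructor
  · rintro ⟨q, ⟨hq, hany⟩, hx⟩
    obtain ⟨v, hv, hin⟩ := List.any_eq_true.mp hany
    exact ⟨v, hv, q, hq, by rw [Option.ite_none_right_eq_some]; exact ⟨hin, by rw [hx]⟩⟩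
  · rintro ⟨v, hv, q, hq, hsome⟩
    rw [Option.ite_none_right_eq_some] at hsome
    exact ⟨q, ⟨hq, List.any_eq_true.mpr ⟨v, hv, hsome.1⟩⟩, Option.some.inj hsome.2⟩

-- ===== VERDICT (by name: the statement is the Claim_ definition above) =====
theorem locate_fields_spec : Claim_equal_locate_fields := by
  intro fields text_lines _
  unfold Spec_locate_fields locate_fields locate_fields_alt
  simp only
  congr 1
  refine PySem.List.foldl_congr_mem' fields _ _ _ ?_
  intro p hp d
  congr 1
  have hsub : ∀ v ∈ p.2, v ∈ fields.flatMap (fun p => p.2) := fun v hv =>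
    List.mem_flatMap.mpr ⟨p, hp, hv⟩
  have : p.2.flatMap (fun v =>
      ((fields.flatMap (fun p => p.2)).foldl
        (fun d v => d.insert v (pvPostings text_lines v)) PySem.Dict.empty).getD v [])
      = p.2.flatMap (pvPostings text_lines) := by
    apply List.flatMap_congr
    intro v hv
    rw [pvGetD_build, if_pos (hsub v hv)]
  rw [this, pvField]
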